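-- pv_equiv track=rewrite | github.com/sum008/python-codes | Practice/digit_degree.py | func_check
-- ===== SOURCE A (Python) =====
-- def func_check(n):
--     count=0
--     n=str(n)
--     if len(n)==1:
--         return 0
--     else:
--         while not len(n)==1:
--             a=0
--             count+=1
--             for i in n:
--                 a=a+int(i)
--             n=str(a)
--         return count
-- ===== SOURCE B (Python) =====
-- def func_check(n):
--     s = str(n)
--     if len(s) == 1:
--         return 0
--     return 1 + func_check(sum(int(c) for c in s))
-- ===== Notes on version B (the rewrite author's own statement) =====
-- stated objective: simpler
-- what changed: Replaces the explicit while loop with a count accumulator by the natural additive-persistence recursion: base case when str(n) has length 1, else 1 + func_check(digit sum).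
import Mathlib
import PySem

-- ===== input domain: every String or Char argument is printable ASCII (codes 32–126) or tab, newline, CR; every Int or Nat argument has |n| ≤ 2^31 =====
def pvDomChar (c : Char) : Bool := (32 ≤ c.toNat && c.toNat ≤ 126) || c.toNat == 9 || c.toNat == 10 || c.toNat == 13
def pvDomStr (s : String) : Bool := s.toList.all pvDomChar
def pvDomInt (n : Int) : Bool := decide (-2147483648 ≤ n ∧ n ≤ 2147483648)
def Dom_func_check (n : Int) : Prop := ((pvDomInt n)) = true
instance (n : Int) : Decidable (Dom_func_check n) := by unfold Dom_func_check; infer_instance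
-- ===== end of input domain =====

-- B replaces A's while loop with a count accumulator by the natural additive-persistence recursion (objective: simpler).


-- int(i) for a single character i: exact for digit characters (under Pre_, 0 ≤ n, every
-- character of str(n) is a digit; on '-' Python raises ValueError, excluded by Pre_).
def pvDigit (c : Char) : Int := (PySem.Int.ofChars? [c]).getD 0

-- ===== PORT A =====
-- the while loop, fuel-limited (fuel n.toNat+1 always suffices on Pre_: the digit sum of a
-- multi-digit nonnegative number is strictly smaller, so iterations ≤ n)
def func_check_loop : Nat → List Char → Int → Int
  | 0, _, count => count
  | fuel + 1, s, count =>
    if s.length == 1 then count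
    else
      -- a=0; count+=1; for i in n: a=a+int(i); n=str(a)
      let a := s.foldl (fun a c => a + pvDigit c) 0
      func_check_loop fuel (PySem.Int.toChars a) (count + 1)

def func_check (n : Int) : Int :=
  let count : Int := 0
  let s := PySem.Int.toChars n          -- n=str(n)
  if s.length == 1 then 0
  else func_check_loop (n.toNat + 1) s count

-- ===== PORT B =====
def func_check_alt_rec : Nat → Int → Int
  | 0, _ => 0
  | fuel + 1, n =>
    let s := PySem.Int.toChars n
    if s.length == 1 then 0
    else 1 + func_check_alt_rec fuel (s.foldl (fun a c => a + pvDigit c) 0)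

def func_check_alt (n : Int) : Int := func_check_alt_rec (n.toNat + 1) n

-- ===== PRECONDITION & SPEC =====
-- A raises ValueError on negative n (int('-') while summing the characters of str(n)); B raises there too.
def Pre_func_check (n : Int) : Prop := 0 ≤ n
instance (n : Int) : Decidable (Pre_func_check n) := by unfold Pre_func_check; infer_instance
def pvWitness_func_check : Int := (39)

def Spec_func_check (n : Int) (out : Int) : Prop := out = func_check_alt n
instance (n : Int) (out : Int) : Decidable (Spec_func_check n out) := by unfold Spec_func_check; infer_instance

-- ===== CLAIM (what is proved, stated in full; the proofs are below) =====
def Claim_equal_func_check : Prop := ∀ (n : Int), Dom_func_check n → Pre_func_check n → Spec_func_check n (func_check n)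

-- ===== LEMMAS AND PROOFS =====
-- A's loop on str(m) with accumulator `count` computes count + B's recursion on m (same fuel).
theorem func_check_loop_eq (fuel : Nat) :
    ∀ (m count : Int),
      func_check_loop fuel (PySem.Int.toChars m) count = count + func_check_alt_rec fuel m := by
  induction fuel with
  | zero => intro m count; simp [func_check_loop, func_check_alt_rec]
  | succ k ih =>
    intro m count
    simp only [func_check_loop, func_check_alt_rec]
    split_ifs with h
    · simp
    · rw [ih]; ring

-- ===== VERDICT (by name: the statement is the Claim_ definition above) =====
theorem func_check_spec : Claim_equal_func_check := by
  intro n _ _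
  show func_check n = func_check_alt n
  unfold func_check func_check_alt
  dsimp only
  split_ifs with h
  · simp only [func_check_alt_rec]; simp [h]
  · rw [func_check_loop_eq]
    simp only [func_check_alt_rec]
    simp [h]
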